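-- pv_equiv track=rewrite | github.com/farookie007/RungeKutta | runge_kutta.py | __clean_eqn
-- ===== SOURCE A (Python) =====
-- def __clean_eqn(eqn):
--     operators = {
--         '^': '**',
--         '{': '(',
--         ']': ')',
--         '}': ')',
--         '[': '(',
--         '÷': '/',
--         '×': '*',
--         "'": 'prime',
--         '‘': 'prime',
--         '’': 'prime',
--         '‛': 'prime'
--         }
--     for operator in list(operators.keys()):
--         eqn = eqn.replace(operator, operators[operator])
--     return eqn
-- ===== SOURCE B (Python) =====
-- def __clean_eqn(eqn):
--     mapping = {
--         '^': '**',
--         '{': '(',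
--         ']': ')',
--         '}': ')',
--         '[': '(',
--         '÷': '/',
--         '×': '*',
--         "'": 'prime',
--         '‘': 'prime',
--         '’': 'prime',
--         '‛': 'prime'
--         }
--     out = []
--     for ch in eqn:
--         out.append(mapping.get(ch, ch))
--     return ''.join(out)
-- ===== Notes on version B (the rewrite author's own statement) =====
-- stated objective: alternative
-- what changed: Instead of 11 sequential whole-string str.replace passes (one per operator key), B makes a single left-to-right pass over the characters, appending mapping.get(ch, ch) for each character and joining the pieces.
import Mathlib
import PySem

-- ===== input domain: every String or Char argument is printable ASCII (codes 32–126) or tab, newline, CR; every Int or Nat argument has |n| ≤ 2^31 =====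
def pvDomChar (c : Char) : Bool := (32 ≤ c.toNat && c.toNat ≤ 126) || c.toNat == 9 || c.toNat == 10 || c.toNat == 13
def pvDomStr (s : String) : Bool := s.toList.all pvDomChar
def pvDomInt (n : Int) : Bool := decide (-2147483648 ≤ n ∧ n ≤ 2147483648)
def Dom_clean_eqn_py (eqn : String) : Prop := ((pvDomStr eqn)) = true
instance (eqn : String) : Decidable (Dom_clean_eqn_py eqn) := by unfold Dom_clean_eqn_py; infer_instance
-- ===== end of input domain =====

-- B replaces A's 11 whole-string str.replace passes by ONE left-to-right pass over the
-- characters, appending mapping.get(ch, ch) per character and joining (objective: alternative).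

-- ===== PORT A =====
def clean_eqn_py (eqn : String) : String :=
  let operators : PySem.Dict String String :=
    (((((((((((PySem.Dict.empty.insert "^" "**").insert "{" "(").insert "]" ")").insert "}" ")").insert "[" "(").insert "÷" "/").insert "×" "*").insert "'" "prime").insert "‘" "prime").insert "’" "prime").insert "‛" "prime")
  operators.keys.foldl (fun e op => PySem.Str.replace e op ((operators.get? op).getD "")) eqn

-- ===== PORT B =====
def clean_eqn_py_alt (eqn : String) : String :=
  let mapping : PySem.Dict Char String :=
    (((((((((((PySem.Dict.empty.insert '^' "**").insert '{' "(").insert ']' ")").insert '}' ")").insert '[' "(").insert '÷' "/").insert '×' "*").insert '\'' "prime").insert '‘' "prime").insert '’' "prime").insert '‛' "prime")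
  let out := eqn.toList.foldl (fun acc ch => acc ++ [(mapping.get? ch).getD (String.ofList [ch])]) []
  PySem.Str.join "" out

-- ===== PRECONDITION & SPEC =====
def Spec_clean_eqn_py (eqn : String) (out : String) : Prop := out = clean_eqn_py_alt eqn
instance (eqn : String) (out : String) : Decidable (Spec_clean_eqn_py eqn out) := by unfold Spec_clean_eqn_py; infer_instance

-- ===== CLAIM (what is proved, stated in full; the proofs are below) =====
def Claim_equal_clean_eqn_py : Prop := ∀ (eqn : String), Dom_clean_eqn_py eqn → Spec_clean_eqn_py eqn (clean_eqn_py eqn)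

-- ===== LEMMAS AND PROOFS =====

-- the per-character map B applies (proof helper)
def pvMapB (c : Char) : List Char :=
  if c = '^' then "**".toList
  else if c = '{' then "(".toList
  else if c = ']' then ")".toList
  else if c = '}' then ")".toList
  else if c = '[' then "(".toList
  else if c = '÷' then "/".toList
  else if c = '×' then "*".toList
  else if c = '\'' then "prime".toList
  else if c = '‘' then "prime".toList
  else if c = '’' then "prime".toList
  else if c = '‛' then "prime".toList
  else [c]

theorem repl_go_single (k : Char) (v : List Char) (l acc : List Char) (fuel : Nat)
    (h : l.length ≤ fuel) :
    PySem.Chars.replace.go [k] v fuel l acc =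
      acc.reverse ++ l.flatMap (fun c => if c = k then v else [c]) := by
  induction l generalizing fuel acc with
  | nil =>
    cases fuel <;> simp [PySem.Chars.replace.go]
  | cons c t ih =>
    cases fuel with
    | zero => simp at h
    | succ n =>
      simp only [PySem.Chars.replace.go]
      by_cases hc : c = k
      · subst hc
        simp [List.isPrefixOf, ih _ _ (by simpa using h)]
      · have hp : [k].isPrefixOf (c :: t) = false := by
          simp [List.isPrefixOf]; exact fun h2 => hc h2.symm
        simp [hp, ih _ _ (by simpa using h), hc]

-- one single-character str.replace is the per-character flatMap
theorem repl_single (k : Char) (v s : List Char) :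
    PySem.Chars.replace s [k] v = s.flatMap (fun c => if c = k then v else [c]) := by
  simp [PySem.Chars.replace, repl_go_single k v s [] s.length le_rfl]

-- A is the 11 nested replaces, literally
theorem a_unfold (eqn : String) : clean_eqn_py eqn =
    PySem.Str.replace (PySem.Str.replace (PySem.Str.replace (PySem.Str.replace (PySem.Str.replace (PySem.Str.replace (PySem.Str.replace (PySem.Str.replace (PySem.Str.replace (PySem.Str.replace (PySem.Str.replace eqn "^" "**") "{" "(") "]" ")") "}" ")") "[" "(") "÷" "/") "×" "*") "'" "prime") "‘" "prime") "’" "prime") "‛" "prime" := rfl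

-- A's chain collapses to one flatMap of the combined per-character map
theorem a_toList (eqn : String) :
    (clean_eqn_py eqn).toList = eqn.toList.flatMap pvMapB := by
  rw [a_unfold]
  simp only [PySem.Str.toList_replace]
  rw [show ("^" : String).toList = ['^'] from rfl, show ("{" : String).toList = ['{'] from rfl,
      show ("]" : String).toList = [']'] from rfl, show ("}" : String).toList = ['}'] from rfl,
      show ("[" : String).toList = ['['] from rfl, show ("÷" : String).toList = ['÷'] from rfl,
      show ("×" : String).toList = ['×'] from rfl, show ("'" : String).toList = ['\''] from rfl,
      show ("‘" : String).toList = ['‘'] from rfl, show ("’" : String).toList = ['’'] from rfl,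
      show ("‛" : String).toList = ['‛'] from rfl]
  simp only [repl_single, List.flatMap_assoc]
  refine List.flatMap_congr (fun c _ => ?_)
  by_cases h1 : c = '^';  · subst h1; decide
  by_cases h2 : c = '{';  · subst h2; decide
  by_cases h3 : c = ']';  · subst h3; decide
  by_cases h4 : c = '}';  · subst h4; decide
  by_cases h5 : c = '[';  · subst h5; decide
  by_cases h6 : c = '÷';  · subst h6; decide
  by_cases h7 : c = '×';  · subst h7; decide
  by_cases h8 : c = '\''; · subst h8; decide
  by_cases h9 : c = '‘';  · subst h9; decide
  by_cases h10 : c = '’'; · subst h10; decide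
  by_cases h11 : c = '‛'; · subst h11; decide
  simp [pvMapB, h1, h2, h3, h4, h5, h6, h7, h8, h9, h10, h11]

theorem intercalate_nil_char (parts : List (List Char)) :
    ([] : List Char).intercalate parts = parts.flatten := by
  induction parts with
  | nil => simp [List.intercalate]
  | cons p t ih =>
    cases t <;> simp_all [List.intercalate, List.intersperse]

-- B's per-character dictionary lookup is pvMapB
theorem b_lookup (c : Char) :
    ((((((((((((((PySem.Dict.empty.insert '^' "**").insert '{' "(").insert ']' ")").insert '}' ")").insert '[' "(").insert '÷' "/").insert '×' "*").insert '\'' "prime").insert '‘' "prime").insert '’' "prime").insert '‛' "prime") : PySem.Dict Char String).get? c).getD (String.ofList [c])).toList = pvMapB c := by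
  by_cases h1 : c = '^';  · subst h1; decide
  by_cases h2 : c = '{';  · subst h2; decide
  by_cases h3 : c = ']';  · subst h3; decide
  by_cases h4 : c = '}';  · subst h4; decide
  by_cases h5 : c = '[';  · subst h5; decide
  by_cases h6 : c = '÷';  · subst h6; decide
  by_cases h7 : c = '×';  · subst h7; decide
  by_cases h8 : c = '\''; · subst h8; decide
  by_cases h9 : c = '‘';  · subst h9; decide
  by_cases h10 : c = '’'; · subst h10; decide
  by_cases h11 : c = '‛'; · subst h11; decide
  have hb1 : ('^' == c) = false := by simp [Ne.symm h1]
  have hb2 : ('{' == c) = false := by simp [Ne.symm h2]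
  have hb3 : (']' == c) = false := by simp [Ne.symm h3]
  have hb4 : ('}' == c) = false := by simp [Ne.symm h4]
  have hb5 : ('[' == c) = false := by simp [Ne.symm h5]
  have hb6 : ('÷' == c) = false := by simp [Ne.symm h6]
  have hb7 : ('×' == c) = false := by simp [Ne.symm h7]
  have hb8 : ('\'' == c) = false := by simp [Ne.symm h8]
  have hb9 : ('‘' == c) = false := by simp [Ne.symm h9]
  have hb10 : ('’' == c) = false := by simp [Ne.symm h10]
  have hb11 : ('‛' == c) = false := by simp [Ne.symm h11]
  simp [PySem.Dict.get?, PySem.Dict.empty, PySem.Dict.insert, pvMapB, List.find?,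
        h1, h2, h3, h4, h5, h6, h7, h8, h9, h10, h11,
        hb1, hb2, hb3, hb4, hb5, hb6, hb7, hb8, hb9, hb10, hb11]

theorem b_toList (eqn : String) :
    (clean_eqn_py_alt eqn).toList = eqn.toList.flatMap pvMapB := by
  have e : clean_eqn_py_alt eqn = PySem.Str.join ""
      (eqn.toList.foldl (fun acc ch => acc ++ [(((((((((((((PySem.Dict.empty.insert '^' "**").insert '{' "(").insert ']' ")").insert '}' ")").insert '[' "(").insert '÷' "/").insert '×' "*").insert '\'' "prime").insert '‘' "prime").insert '’' "prime").insert '‛' "prime") : PySem.Dict Char String).get? ch).getD (String.ofList [ch])]) []) := rfl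
  rw [e, PySem.List.foldl_append_singleton_eq_map, List.nil_append, PySem.Str.toList_join]
  rw [show ("" : String).toList = ([] : List Char) from rfl]
  rw [PySem.Chars.join, intercalate_nil_char, List.map_map, ← List.flatMap_def]
  refine List.flatMap_congr (fun c _ => ?_)
  simpa using b_lookup c

-- ===== VERDICT (by name: the statement is the Claim_ definition above) =====
theorem clean_eqn_py_spec : Claim_equal_clean_eqn_py := by
  intro eqn _
  unfold Spec_clean_eqn_py
  have h := (a_toList eqn).trans (b_toList eqn).symm
  have h2 := congrArg String.ofList h
  simpa [String.ofList_toList] using h2
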